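-- pv_equiv track=rewrite | github.com/Codegx-Technology/elite-cursor-snippets | offline_video_maker/generate_video.py | _enhance_prompt_for_africa
-- ===== SOURCE A (Python) =====
-- def _enhance_prompt_for_africa(description: str) -> str:
--     """
--     // [TASK]: Enhance prompts with Kenya-first visual elements
--     // [GOAL]: Ensure beautiful, culturally appropriate African imagery
--     // [SNIPPET]: kenyafirst
--     """
--     # Base quality enhancers
--     quality_terms = "photorealistic, high quality, beautiful lighting, cinematic"
--
--     # African/Kenyan context enhancers
--     african_context = ""
--
--     # Detect scene types and add appropriate African context
--     description_lower = description.lower()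
--
--     if any(
--         term in description_lower
--         for term in ["school", "education", "learning", "teaching"]
--     ):
--         african_context = "African school setting, acacia trees in background, warm golden hour lighting"
--     elif any(
--         term in description_lower
--         for term in ["community", "people", "gathering", "family"]
--     ):
--         african_context = "vibrant African community, colorful traditional clothing, ubuntu spirit"
--     elif any(
--         term in description_lower
--         for term in ["technology", "computer", "coding", "modern"]
--     ):
--         african_context = "modern African tech hub, Nairobi skyline, blend of traditional and contemporary"
--     elif any(
--         term in description_lower for term in ["landscape", "nature", "setting"]
--     ):
--         african_context = (
--             "beautiful Kenyan landscape, savanna, Mount Kenya in distance"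
--         )
--     elif any(
--         term in description_lower
--         for term in ["celebration", "achievement", "success"]
--     ):
--         african_context = (
--             "joyful African celebration, colorful fabrics, community pride"
--         )
--     else:
--         african_context = (
--             "authentic African setting, warm natural lighting, cultural richness"
--         )
--
--     # Combine all elements
--     enhanced = f"{description}, {african_context}, {quality_terms}"
--
--     # Ensure we don't exceed typical prompt limits
--     if len(enhanced) > 200:
--         enhanced = f"{description}, {african_context}, {quality_terms}"[:200]
--
--     return enhanced
-- ===== SOURCE B (Python) =====
-- _KEYWORD_PRIORITY = {
--     "school": 0, "education": 0, "learning": 0, "teaching": 0,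
--     "community": 1, "people": 1, "gathering": 1, "family": 1,
--     "technology": 2, "computer": 2, "coding": 2, "modern": 2,
--     "landscape": 3, "nature": 3, "setting": 3,
--     "celebration": 4, "achievement": 4, "success": 4,
-- }
--
-- _CONTEXTS = (
--     "African school setting, acacia trees in background, warm golden hour lighting",
--     "vibrant African community, colorful traditional clothing, ubuntu spirit",
--     "modern African tech hub, Nairobi skyline, blend of traditional and contemporary",
--     "beautiful Kenyan landscape, savanna, Mount Kenya in distance",
--     "joyful African celebration, colorful fabrics, community pride",
--     "authentic African setting, warm natural lighting, cultural richness",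
-- )
--
-- _QUALITY_TERMS = "photorealistic, high quality, beautiful lighting, cinematic"
--
--
-- def _enhance_prompt_for_africa(description: str) -> str:
--     description_lower = description.lower()
--     best = 5
--     for keyword, priority in _KEYWORD_PRIORITY.items():
--         if keyword in description_lower and priority < best:
--             best = priority
--     return f"{description}, {_CONTEXTS[best]}, {_QUALITY_TERMS}"[:200]
-- ===== Notes on version B (the rewrite author's own statement) =====
-- stated objective: alternative
-- what changed: Replaces the staged if/elif group checks with one flat pass over a keyword->priority map keeping the minimum matching priority (default 5), indexes a context tuple by it, and truncates unconditionally with [:200] instead of branching on the length.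
import Mathlib
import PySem

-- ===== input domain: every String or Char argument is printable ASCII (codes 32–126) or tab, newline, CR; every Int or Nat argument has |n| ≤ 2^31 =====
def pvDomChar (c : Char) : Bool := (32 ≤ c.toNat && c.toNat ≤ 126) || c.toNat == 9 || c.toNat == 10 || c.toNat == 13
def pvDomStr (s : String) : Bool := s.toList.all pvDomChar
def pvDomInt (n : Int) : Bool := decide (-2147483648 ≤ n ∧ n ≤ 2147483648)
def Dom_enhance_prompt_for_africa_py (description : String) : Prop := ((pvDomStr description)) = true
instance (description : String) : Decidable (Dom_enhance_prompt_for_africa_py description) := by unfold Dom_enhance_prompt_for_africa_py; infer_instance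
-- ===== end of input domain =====

-- B replaces the staged if/elif group checks by one flat minimum-priority pass over a keyword→priority map plus an unconditional [:200] truncation (alternative; same cost).

-- ===== PORT A =====
-- literal transliteration of the if/elif chain of _enhance_prompt_for_africa
def enhance_prompt_for_africa_py (description : String) : String :=
  let quality_terms := "photorealistic, high quality, beautiful lighting, cinematic"
  let description_lower := PySem.Str.lower description
  let african_context :=
    if ["school", "education", "learning", "teaching"].any
        (fun term => PySem.Str.isIn term description_lower) then
      "African school setting, acacia trees in background, warm golden hour lighting"
    else if ["community", "people", "gathering", "family"].any
        (fun term => PySem.Str.isIn term description_lower) then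
      "vibrant African community, colorful traditional clothing, ubuntu spirit"
    else if ["technology", "computer", "coding", "modern"].any
        (fun term => PySem.Str.isIn term description_lower) then
      "modern African tech hub, Nairobi skyline, blend of traditional and contemporary"
    else if ["landscape", "nature", "setting"].any
        (fun term => PySem.Str.isIn term description_lower) then
      "beautiful Kenyan landscape, savanna, Mount Kenya in distance"
    else if ["celebration", "achievement", "success"].any
        (fun term => PySem.Str.isIn term description_lower) then
      "joyful African celebration, colorful fabrics, community pride"
    else
      "authentic African setting, warm natural lighting, cultural richness"
  let enhanced := PySem.Str.join "" [description, ", ", african_context, ", ", quality_terms]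
  if PySem.Str.len enhanced > 200 then
    PySem.Str.slice (PySem.Str.join "" [description, ", ", african_context, ", ", quality_terms])
      none (some 200)
  else enhanced

-- ===== PORT B =====
def pvKeywordPriority : List (String × Nat) :=
  [ ("school", 0), ("education", 0), ("learning", 0), ("teaching", 0),
    ("community", 1), ("people", 1), ("gathering", 1), ("family", 1),
    ("technology", 2), ("computer", 2), ("coding", 2), ("modern", 2),
    ("landscape", 3), ("nature", 3), ("setting", 3),
    ("celebration", 4), ("achievement", 4), ("success", 4) ]

def pvContexts : List String :=
  [ "African school setting, acacia trees in background, warm golden hour lighting",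
    "vibrant African community, colorful traditional clothing, ubuntu spirit",
    "modern African tech hub, Nairobi skyline, blend of traditional and contemporary",
    "beautiful Kenyan landscape, savanna, Mount Kenya in distance",
    "joyful African celebration, colorful fabrics, community pride",
    "authentic African setting, warm natural lighting, cultural richness" ]

def pvQualityTerms : String :=
  "photorealistic, high quality, beautiful lighting, cinematic"

def enhance_prompt_for_africa_py_alt (description : String) : String :=
  let description_lower := PySem.Str.lower description
  let best := pvKeywordPriority.foldl
    (fun best p =>
      if PySem.Str.isIn p.1 description_lower && decide (p.2 < best) then p.2 else best) 5
  PySem.Str.slice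
    (PySem.Str.join "" [description, ", ", pvContexts.getD best "", ", ", pvQualityTerms])
    none (some 200)

-- ===== PRECONDITION & SPEC =====
def Spec_enhance_prompt_for_africa_py (description : String) (out : String) : Prop := out = enhance_prompt_for_africa_py_alt description
instance (description : String) (out : String) : Decidable (Spec_enhance_prompt_for_africa_py description out) := by unfold Spec_enhance_prompt_for_africa_py; infer_instance

-- ===== CLAIM (what is proved, stated in full; the proofs are below) =====
def Claim_equal_enhance_prompt_for_africa_py : Prop := ∀ (description : String), Dom_enhance_prompt_for_africa_py description → Spec_enhance_prompt_for_africa_py description (enhance_prompt_for_africa_py description)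

-- ===== LEMMAS AND PROOFS =====

-- fold over one priority group: keeps the accumulator unless some keyword matches and g is smaller
theorem pvFoldGroup3 (q : String → Bool) (k1 k2 k3 : String) (g a : Nat) :
    List.foldl (fun b (p : String × Nat) => if q p.1 && decide (p.2 < b) then p.2 else b) a
        [(k1, g), (k2, g), (k3, g)] =
      if (q k1 || q k2 || q k3) && decide (g < a) then g else a := by
  cases h1 : q k1 <;> cases h2 : q k2 <;> cases h3 : q k3 <;>
    by_cases hg : g < a <;>
      (simp_all [List.foldl]) <;> (try split_ifs) <;> omega

theorem pvFoldGroup4 (q : String → Bool) (k1 k2 k3 k4 : String) (g a : Nat) :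
    List.foldl (fun b (p : String × Nat) => if q p.1 && decide (p.2 < b) then p.2 else b) a
        [(k1, g), (k2, g), (k3, g), (k4, g)] =
      if (q k1 || q k2 || q k3 || q k4) && decide (g < a) then g else a := by
  cases h1 : q k1 <;> cases h2 : q k2 <;> cases h3 : q k3 <;> cases h4 : q k4 <;>
    by_cases hg : g < a <;>
      (simp_all [List.foldl]) <;> (try split_ifs) <;> omega

theorem pvTrunc (s : String) (h : ¬ PySem.Str.len s > 200) :
    PySem.Str.slice s none (some 200) = s := by
  simp [PySem.Str.slice, PySem.Str.len] at *
  rw [PySem.List.slice_to s.toList (by norm_num)]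
  have hl : s.toList.length ≤ (200 : Int).toNat := by simpa using h
  rw [List.take_of_length_le hl]
  simp

theorem pvTruncIf (s : String) :
    (if PySem.Str.len s > 200 then PySem.Str.slice s none (some 200) else s) =
      PySem.Str.slice s none (some 200) := by
  split_ifs with h
  · rfl
  · rw [pvTrunc s h]

-- ===== VERDICT (by name: the statement is the Claim_ definition above) =====
theorem enhance_prompt_for_africa_py_spec : Claim_equal_enhance_prompt_for_africa_py := by
  intro description _
  unfold Spec_enhance_prompt_for_africa_py
  simp only [enhance_prompt_for_africa_py, enhance_prompt_for_africa_py_alt]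
  rw [pvTruncIf]
  have hsplit : pvKeywordPriority =
      [("school",0),("education",0),("learning",0),("teaching",0)] ++
      ([("community",1),("people",1),("gathering",1),("family",1)] ++
      ([("technology",2),("computer",2),("coding",2),("modern",2)] ++
      ([("landscape",3),("nature",3),("setting",3)] ++
      [("celebration",4),("achievement",4),("success",4)]))) := rfl
  rw [hsplit]
  simp only [List.foldl_append]
  rw [pvFoldGroup4 (fun t => PySem.Str.isIn t (PySem.Str.lower description)),
    pvFoldGroup4 (fun t => PySem.Str.isIn t (PySem.Str.lower description)),
    pvFoldGroup4 (fun t => PySem.Str.isIn t (PySem.Str.lower description)),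
    pvFoldGroup3 (fun t => PySem.Str.isIn t (PySem.Str.lower description)),
    pvFoldGroup3 (fun t => PySem.Str.isIn t (PySem.Str.lower description))]
  simp only [List.any_cons, List.any_nil, Bool.or_false, Bool.or_assoc]
  generalize (PySem.Str.isIn "school" (PySem.Str.lower description)) = c1
  generalize (PySem.Str.isIn "education" (PySem.Str.lower description)) = c2
  generalize (PySem.Str.isIn "learning" (PySem.Str.lower description)) = c3
  generalize (PySem.Str.isIn "teaching" (PySem.Str.lower description)) = c4
  generalize (PySem.Str.isIn "community" (PySem.Str.lower description)) = c5
  generalize (PySem.Str.isIn "people" (PySem.Str.lower description)) = c6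
  generalize (PySem.Str.isIn "gathering" (PySem.Str.lower description)) = c7
  generalize (PySem.Str.isIn "family" (PySem.Str.lower description)) = c8
  generalize (PySem.Str.isIn "technology" (PySem.Str.lower description)) = c9
  generalize (PySem.Str.isIn "computer" (PySem.Str.lower description)) = c10
  generalize (PySem.Str.isIn "coding" (PySem.Str.lower description)) = c11
  generalize (PySem.Str.isIn "modern" (PySem.Str.lower description)) = c12
  generalize (PySem.Str.isIn "landscape" (PySem.Str.lower description)) = c13
  generalize (PySem.Str.isIn "nature" (PySem.Str.lower description)) = c14
  generalize (PySem.Str.isIn "setting" (PySem.Str.lower description)) = c15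
  generalize (PySem.Str.isIn "celebration" (PySem.Str.lower description)) = c16
  generalize (PySem.Str.isIn "achievement" (PySem.Str.lower description)) = c17
  generalize (PySem.Str.isIn "success" (PySem.Str.lower description)) = c18
  generalize h0 : (c1 || (c2 || (c3 || c4))) = b0
  generalize h1 : (c5 || (c6 || (c7 || c8))) = b1
  generalize h2 : (c9 || (c10 || (c11 || c12))) = b2
  generalize h3 : (c13 || (c14 || c15)) = b3
  generalize h4 : (c16 || (c17 || c18)) = b4
  cases b0 <;> cases b1 <;> cases b2 <;> cases b3 <;> cases b4 <;>
    simp [pvContexts, pvQualityTerms, List.getD]
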